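-- pv_equiv track=rewrite | github.com/Jennifer-Vo/Elevation-Map-Analysis | elevation.py | find_local_sink
-- ===== SOURCE A (Python) =====
-- from typing import List
--
-- def find_local_sink(elevation_map: List[List[int]],
--                     cell: List[int]) -> List[int]:
--     """Return the local sink of cell cell in elevation map elevation_map.
--
--     Precondition: elevation_map is a valid elevation map.
--                   elevation_map contains no duplicate elevation values.
--                   cell is a valid cell in elevation_map.
--
--     >>> find_local_sink(UNIQUE_3X3, [1, 1])
--     [0, 0]
--     >>> find_local_sink(UNIQUE_3X3, [2, 0])
--     [2, 0]
--     >>> find_local_sink(UNIQUE_4X4, [1, 3])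
--     [0, 2]
--     >>> find_local_sink(UNIQUE_4X4, [2, 2])
--     [2, 1]
--     """
--     i_sink = cell[0] - 1
--     j_sink = cell[1] - 1
--     for i in range(len(elevation_map)):
--         for j in range(len(elevation_map)):
--             if abs(i-cell[0]) <= 1 and abs(j-cell[1]) <= 1 and elevation_map[i]\
--             [j] < elevation_map[i_sink][j_sink]:
--                 i_sink = i
--                 j_sink = j
--             local_sink_coordinates = [i_sink, j_sink]
--     return local_sink_coordinates
-- ===== SOURCE B (Python) =====
-- def find_local_sink(elevation_map, cell):
--     """O(1) re-implementation: examine only the (clipped) 3x3 neighborhood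
--     of cell, in the same row-major order and with the same initial
--     reference cell (cell[0]-1, cell[1]-1) as the original."""
--     n = len(elevation_map)
--     i_sink = cell[0] - 1
--     j_sink = cell[1] - 1
--     for i in range(max(cell[0] - 1, 0), min(cell[0] + 2, n)):
--         for j in range(max(cell[1] - 1, 0), min(cell[1] + 2, n)):
--             if elevation_map[i][j] < elevation_map[i_sink][j_sink]:
--                 i_sink = i
--                 j_sink = j
--     return [i_sink, j_sink]
-- ===== Notes on version B (the rewrite author's own statement) =====
-- stated objective: faster
-- what changed: B examines only the clipped 3x3 neighborhood of the cell directly (keeping A's initial reference cell and row-major scan order) instead of A's scan of the whole n x n grid with an in-neighborhood test per cell.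
import Mathlib
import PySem

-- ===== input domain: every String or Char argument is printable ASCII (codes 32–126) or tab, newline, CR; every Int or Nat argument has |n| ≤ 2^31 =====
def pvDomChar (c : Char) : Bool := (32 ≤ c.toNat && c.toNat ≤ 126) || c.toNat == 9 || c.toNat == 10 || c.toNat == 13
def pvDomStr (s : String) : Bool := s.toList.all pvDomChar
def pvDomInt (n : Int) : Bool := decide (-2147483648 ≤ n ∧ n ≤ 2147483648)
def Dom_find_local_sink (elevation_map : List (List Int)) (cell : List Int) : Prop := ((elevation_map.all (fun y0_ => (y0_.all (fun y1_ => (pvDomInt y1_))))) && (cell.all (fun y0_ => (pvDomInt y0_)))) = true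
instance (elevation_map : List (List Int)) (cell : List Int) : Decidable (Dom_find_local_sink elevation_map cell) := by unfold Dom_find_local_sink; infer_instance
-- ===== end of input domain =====

-- B scans only the clipped 3x3 neighborhood (O(1)) instead of A's full-grid scan,
-- keeping A's initial reference cell (cell[0]-1, cell[1]-1) and row-major order.

-- elevation_map[i][j] with Python (negative-wrapping) indexing; total form, exact under Pre_
def pvFetch (em : List (List Int)) (i j : Int) : Int :=
  PySem.List.pyGetD (PySem.List.pyGetD em i []) j 0

-- ===== PORT A =====
def find_local_sink (elevation_map : List (List Int)) (cell : List Int) : List Int :=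
  let c0 := PySem.List.pyGetD cell 0 0
  let c1 := PySem.List.pyGetD cell 1 0
  let n : Int := elevation_map.length
  let st :=
    (PySem.List.pyRange 0 n 1).foldl (fun st i =>
      (PySem.List.pyRange 0 n 1).foldl (fun st j =>
        let st' :=
          if |i - c0| ≤ 1 ∧ |j - c1| ≤ 1 ∧
              pvFetch elevation_map i j < pvFetch elevation_map st.1 st.2.1
          then (i, j, st.2.2) else st
        -- local_sink_coordinates = [i_sink, j_sink]  (assigned every iteration)
        (st'.1, st'.2.1, some [st'.1, st'.2.1])) st) (c0 - 1, c1 - 1, (none : Option (List Int)))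
  st.2.2.getD []   -- none = NameError (empty map), excluded by Pre_

-- ===== PORT B =====
def find_local_sink_alt (elevation_map : List (List Int)) (cell : List Int) : List Int :=
  let n : Int := elevation_map.length
  let c0 := PySem.List.pyGetD cell 0 0
  let c1 := PySem.List.pyGetD cell 1 0
  let st :=
    (PySem.List.pyRange (max (c0 - 1) 0) (min (c0 + 2) n) 1).foldl (fun st i =>
      (PySem.List.pyRange (max (c1 - 1) 0) (min (c1 + 2) n) 1).foldl (fun st j =>
        if pvFetch elevation_map i j < pvFetch elevation_map st.1 st.2
        then (i, j) else st) st) (c0 - 1, c1 - 1)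
  [st.1, st.2]

-- ===== PRECONDITION & SPEC =====
-- Exactly the inputs on which the Python A returns: a non-empty map, cell[0]/cell[1] present,
-- and either the clipped 3x3 neighborhood is empty (no cell access happens) or the initial
-- reference cell elevation_map[cell[0]-1][cell[1]-1] (Python wraparound) exists and every row
-- of the neighborhood is long enough for every scanned column.
def Pre_find_local_sink (elevation_map : List (List Int)) (cell : List Int) : Prop :=
  2 ≤ cell.length ∧ 1 ≤ elevation_map.length ∧
  ((PySem.List.pyGetD cell 0 0 < -1 ∨ (elevation_map.length : Int) < PySem.List.pyGetD cell 0 0 ∨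
    PySem.List.pyGetD cell 1 0 < -1 ∨ (elevation_map.length : Int) < PySem.List.pyGetD cell 1 0) ∨
   (PySem.Raise.InRange elevation_map.length (PySem.List.pyGetD cell 0 0 - 1) ∧
    PySem.Raise.InRange (PySem.List.pyGetD elevation_map (PySem.List.pyGetD cell 0 0 - 1) []).length
      (PySem.List.pyGetD cell 1 0 - 1) ∧
    ∀ i ∈ PySem.List.pyRange (max (PySem.List.pyGetD cell 0 0 - 1) 0)
        (min (PySem.List.pyGetD cell 0 0 + 2) (elevation_map.length : Int)) 1,
      min (PySem.List.pyGetD cell 1 0 + 2) (elevation_map.length : Int) ≤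
        ((PySem.List.pyGetD elevation_map i []).length : Int)))
instance (elevation_map : List (List Int)) (cell : List Int) : Decidable (Pre_find_local_sink elevation_map cell) := by unfold Pre_find_local_sink; infer_instance

def pvWitness_find_local_sink : List (List Int) × List Int := ([[3, 2, 1], [4, 5, 6], [7, 8, 0]], [1, 1])

def Spec_find_local_sink (elevation_map : List (List Int)) (cell : List Int) (out : List Int) : Prop := out = find_local_sink_alt elevation_map cell
instance (elevation_map : List (List Int)) (cell : List Int) (out : List Int) : Decidable (Spec_find_local_sink elevation_map cell out) := by unfold Spec_find_local_sink; infer_instance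

-- ===== CLAIM (what is proved, stated in full; the proofs are below) =====
def Claim_equal_find_local_sink : Prop := ∀ (elevation_map : List (List Int)) (cell : List Int), Dom_find_local_sink elevation_map cell → Pre_find_local_sink elevation_map cell → Spec_find_local_sink elevation_map cell (find_local_sink elevation_map cell)
-- ===== LEMMAS AND PROOFS =====

-- B's (unguarded) inner step for a fixed row i
def pvStep (em : List (List Int)) (i : Int) (p : Int × Int) (j : Int) : Int × Int :=
  if pvFetch em i j < pvFetch em p.1 p.2 then (i, j) else p

-- A's guarded step on the (i_sink, j_sink) pair
def pvStepG (em : List (List Int)) (c0 c1 i : Int) (p : Int × Int) (j : Int) : Int × Int :=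
  if |i - c0| ≤ 1 ∧ |j - c1| ≤ 1 ∧ pvFetch em i j < pvFetch em p.1 p.2 then (i, j) else p

theorem pv_foldl_id {α β : Type} (l : List α) (s : β) : l.foldl (fun s _ => s) s = s := by
  induction l generalizing s <;> simp_all

-- a fold over range(0, n) whose body fires only for |i - c| ≤ 1 is the fold over the clipped window
theorem pv_clip {σ : Type} (c n : Int) (hn : 0 ≤ n) (F : Int → σ → σ) (s : σ) :
    (PySem.List.pyRange 0 n).foldl (fun st i => if |i - c| ≤ 1 then F i st else st) s
    = (PySem.List.pyRange (max (c - 1) 0) (min (c + 2) n)).foldl (fun st i => F i st) s := by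
  by_cases hc : -1 ≤ c ∧ c ≤ n
  · rw [PySem.List.pyRange_one_append 0 (max (c - 1) 0) n (by omega) (by omega),
        PySem.List.pyRange_one_append (max (c - 1) 0) (min (c + 2) n) n (by omega) (by omega),
        List.foldl_append, List.foldl_append,
        PySem.List.foldl_congr_mem _ _ (fun s _ => s) s ?pre, pv_foldl_id,
        PySem.List.foldl_congr_mem (PySem.List.pyRange (max (c - 1) 0) (min (c + 2) n))
          _ (fun st i => F i st) _ ?mid,
        PySem.List.foldl_congr_mem _ _ (fun s _ => s) _ ?post, pv_foldl_id]
    case pre =>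
      intro acc x hx
      rw [PySem.List.mem_pyRange_one] at hx
      have : ¬ (|x - c| ≤ 1) := by rw [abs_le]; omega
      simp [this]
    case mid =>
      intro acc x hx
      rw [PySem.List.mem_pyRange_one] at hx
      have : |x - c| ≤ 1 := by rw [abs_le]; omega
      simp [this]
    case post =>
      intro acc x hx
      rw [PySem.List.mem_pyRange_one] at hx
      have : ¬ (|x - c| ≤ 1) := by rw [abs_le]; omega
      simp [this]
  · have hrhs : PySem.List.pyRange (max (c - 1) 0) (min (c + 2) n) = [] :=
      PySem.List.pyRange_one_eq_nil (by omega)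
    rw [hrhs, List.foldl_nil,
        PySem.List.foldl_congr_mem _ _ (fun s _ => s) s ?out, pv_foldl_id]
    case out =>
      intro acc x hx
      rw [PySem.List.mem_pyRange_one] at hx
      have : ¬ (|x - c| ≤ 1) := by rw [abs_le]; omega
      simp [this]

-- the guarded inner scan over the whole row equals the unguarded scan over the clipped columns
theorem pv_inner_eq (em : List (List Int)) (c0 c1 i : Int) (hi : |i - c0| ≤ 1) (s : Int × Int) :
    (PySem.List.pyRange 0 (em.length : Int)).foldl (pvStepG em c0 c1 i) s
    = (PySem.List.pyRange (max (c1 - 1) 0) (min (c1 + 2) (em.length : Int))).foldl (pvStep em i) s := by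
  have hpt : ∀ (acc : Int × Int), ∀ j ∈ PySem.List.pyRange 0 (em.length : Int),
      pvStepG em c0 c1 i acc j
      = (fun (p : Int × Int) (j : Int) => if |j - c1| ≤ 1 then pvStep em i p j else p) acc j := by
    intro p j _
    by_cases hA : |j - c1| ≤ 1 <;>
      by_cases hB : pvFetch em i j < pvFetch em p.1 p.2 <;>
        simp [pvStepG, pvStep, hi, hA, hB]
  rw [PySem.List.foldl_congr_mem _ _ _ s hpt]
  exact pv_clip c1 (em.length : Int) (Int.natCast_nonneg _) (fun j st => pvStep em i st j) s

-- a row with |i - c0| > 1 leaves the state unchanged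
theorem pv_row_id (em : List (List Int)) (c0 c1 i : Int) (hi : ¬ (|i - c0| ≤ 1)) (s : Int × Int) :
    (PySem.List.pyRange 0 (em.length : Int)).foldl (pvStepG em c0 c1 i) s = s := by
  rw [PySem.List.foldl_congr_mem _ _ (fun s _ => s) s ?_, pv_foldl_id]
  intro acc x _
  simp [pvStepG, hi]

-- the full guarded double scan equals the clipped unguarded double scan
theorem pv_outer_eq (em : List (List Int)) (c0 c1 : Int) (s : Int × Int) :
    (PySem.List.pyRange 0 (em.length : Int)).foldl
      (fun st i => (PySem.List.pyRange 0 (em.length : Int)).foldl (pvStepG em c0 c1 i) st) s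
    = (PySem.List.pyRange (max (c0 - 1) 0) (min (c0 + 2) (em.length : Int))).foldl
      (fun st i => (PySem.List.pyRange (max (c1 - 1) 0) (min (c1 + 2) (em.length : Int))).foldl
        (pvStep em i) st) s := by
  have hpt : ∀ (acc : Int × Int), ∀ i ∈ PySem.List.pyRange 0 (em.length : Int),
      (PySem.List.pyRange 0 (em.length : Int)).foldl (pvStepG em c0 c1 i) acc
      = (fun (st : Int × Int) (i : Int) => if |i - c0| ≤ 1 then
          (PySem.List.pyRange (max (c1 - 1) 0) (min (c1 + 2) (em.length : Int))).foldl
            (pvStep em i) st else st) acc i := by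
    intro acc i _
    by_cases h : |i - c0| ≤ 1
    · simp only [if_pos h]; exact pv_inner_eq em c0 c1 i h acc
    · simp only [if_neg h]; exact pv_row_id em c0 c1 i h acc
  rw [PySem.List.foldl_congr_mem _ _ _ s hpt]
  exact pv_clip c0 (em.length : Int) (Int.natCast_nonneg _)
    (fun i st => (PySem.List.pyRange (max (c1 - 1) 0) (min (c1 + 2) (em.length : Int))).foldl
      (pvStep em i) st) s

-- a fold whose body also re-records the current pair in the third component
theorem pv_foldl_track {α : Type} (f : (Int × Int) → α → (Int × Int)) (js : List α)
    (s : Int × Int × Option (List Int)) (h : js ≠ []) :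
    js.foldl (fun st j => ((f (st.1, st.2.1) j).1, (f (st.1, st.2.1) j).2,
        some [(f (st.1, st.2.1) j).1, (f (st.1, st.2.1) j).2])) s
    = ((js.foldl f (s.1, s.2.1)).1, (js.foldl f (s.1, s.2.1)).2,
        some [(js.foldl f (s.1, s.2.1)).1, (js.foldl f (s.1, s.2.1)).2]) := by
  induction js generalizing s with
  | nil => simp at h
  | cons x xs ih =>
    by_cases hxs : xs = []
    · subst hxs; simp
    · rw [List.foldl_cons, ih _ hxs, List.foldl_cons]

-- ===== VERDICT (by name: the statement is the Claim_ definition above) =====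
theorem find_local_sink_spec : Claim_equal_find_local_sink := by
  intro em cell _ hpre
  obtain ⟨-, hlen, -⟩ := hpre
  unfold Spec_find_local_sink
  set c0 : Int := PySem.List.pyGetD cell 0 0 with hc0
  set c1 : Int := PySem.List.pyGetD cell 1 0 with hc1
  have hne : PySem.List.pyRange 0 (em.length : Int) ≠ [] := by
    rw [PySem.List.pyRange_one_cons (by exact_mod_cast hlen)]; simp
  -- A's value as the literal triple-state double fold (definitional)
  have h1 : find_local_sink em cell
      = ((PySem.List.pyRange 0 (em.length : Int)).foldl
          (fun (st : Int × Int × Option (List Int)) (i : Int) =>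
            (PySem.List.pyRange 0 (em.length : Int)).foldl
              (fun (st : Int × Int × Option (List Int)) (j : Int) =>
                let st' := if |i - c0| ≤ 1 ∧ |j - c1| ≤ 1 ∧
                    pvFetch em i j < pvFetch em st.1 st.2.1 then (i, j, st.2.2) else st
                (st'.1, st'.2.1, some [st'.1, st'.2.1])) st)
          (c0 - 1, c1 - 1, none)).2.2.getD [] := rfl
  -- the body is the pvStepG-tracked body
  have h2 : ((PySem.List.pyRange 0 (em.length : Int)).foldl
          (fun (st : Int × Int × Option (List Int)) (i : Int) =>
            (PySem.List.pyRange 0 (em.length : Int)).foldl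
              (fun (st : Int × Int × Option (List Int)) (j : Int) =>
                let st' := if |i - c0| ≤ 1 ∧ |j - c1| ≤ 1 ∧
                    pvFetch em i j < pvFetch em st.1 st.2.1 then (i, j, st.2.2) else st
                (st'.1, st'.2.1, some [st'.1, st'.2.1])) st)
          (c0 - 1, c1 - 1, none))
      = ((PySem.List.pyRange 0 (em.length : Int)).foldl
          (fun (st : Int × Int × Option (List Int)) (i : Int) =>
            (PySem.List.pyRange 0 (em.length : Int)).foldl
              (fun (st : Int × Int × Option (List Int)) (j : Int) =>
                ((pvStepG em c0 c1 i (st.1, st.2.1) j).1, (pvStepG em c0 c1 i (st.1, st.2.1) j).2,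
                  some [(pvStepG em c0 c1 i (st.1, st.2.1) j).1,
                    (pvStepG em c0 c1 i (st.1, st.2.1) j).2])) st)
          (c0 - 1, c1 - 1, none)) := by
    apply PySem.List.foldl_congr_mem
    intro acc i _
    apply PySem.List.foldl_congr_mem
    intro acc2 j _
    simp only [pvStepG]
    split_ifs <;> rfl
  -- collapse the tracked third component (each row is non-empty)
  have h3 : ((PySem.List.pyRange 0 (em.length : Int)).foldl
          (fun (st : Int × Int × Option (List Int)) (i : Int) =>
            (PySem.List.pyRange 0 (em.length : Int)).foldl
              (fun (st : Int × Int × Option (List Int)) (j : Int) =>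
                ((pvStepG em c0 c1 i (st.1, st.2.1) j).1, (pvStepG em c0 c1 i (st.1, st.2.1) j).2,
                  some [(pvStepG em c0 c1 i (st.1, st.2.1) j).1,
                    (pvStepG em c0 c1 i (st.1, st.2.1) j).2])) st)
          (c0 - 1, c1 - 1, none))
      = ((((PySem.List.pyRange 0 (em.length : Int)).foldl
            (fun (p : Int × Int) (i : Int) =>
              (PySem.List.pyRange 0 (em.length : Int)).foldl (pvStepG em c0 c1 i) p)
            (c0 - 1, c1 - 1))).1,
          (((PySem.List.pyRange 0 (em.length : Int)).foldl
            (fun (p : Int × Int) (i : Int) =>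
              (PySem.List.pyRange 0 (em.length : Int)).foldl (pvStepG em c0 c1 i) p)
            (c0 - 1, c1 - 1))).2,
          some [(((PySem.List.pyRange 0 (em.length : Int)).foldl
            (fun (p : Int × Int) (i : Int) =>
              (PySem.List.pyRange 0 (em.length : Int)).foldl (pvStepG em c0 c1 i) p)
            (c0 - 1, c1 - 1))).1,
            (((PySem.List.pyRange 0 (em.length : Int)).foldl
            (fun (p : Int × Int) (i : Int) =>
              (PySem.List.pyRange 0 (em.length : Int)).foldl (pvStepG em c0 c1 i) p)
            (c0 - 1, c1 - 1))).2]) := by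
    rw [PySem.List.foldl_congr_mem _ _
        (fun (st : Int × Int × Option (List Int)) (i : Int) =>
          (((PySem.List.pyRange 0 (em.length : Int)).foldl (pvStepG em c0 c1 i) (st.1, st.2.1)).1,
            ((PySem.List.pyRange 0 (em.length : Int)).foldl (pvStepG em c0 c1 i) (st.1, st.2.1)).2,
            some [((PySem.List.pyRange 0 (em.length : Int)).foldl (pvStepG em c0 c1 i) (st.1, st.2.1)).1,
              ((PySem.List.pyRange 0 (em.length : Int)).foldl (pvStepG em c0 c1 i) (st.1, st.2.1)).2]))
        _ (fun acc i _ => pv_foldl_track (pvStepG em c0 c1 i) _ acc hne)]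
    exact pv_foldl_track (fun (p : Int × Int) (i : Int) =>
      (PySem.List.pyRange 0 (em.length : Int)).foldl (pvStepG em c0 c1 i) p) _ _ hne
  -- B's value (definitional unfolding of the lets)
  have hB : find_local_sink_alt em cell
      = [((PySem.List.pyRange (max (c0 - 1) 0) (min (c0 + 2) (em.length : Int))).foldl
          (fun (st : Int × Int) (i : Int) =>
            (PySem.List.pyRange (max (c1 - 1) 0) (min (c1 + 2) (em.length : Int))).foldl
              (pvStep em i) st) (c0 - 1, c1 - 1)).1,
         ((PySem.List.pyRange (max (c0 - 1) 0) (min (c0 + 2) (em.length : Int))).foldl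
          (fun (st : Int × Int) (i : Int) =>
            (PySem.List.pyRange (max (c1 - 1) 0) (min (c1 + 2) (em.length : Int))).foldl
              (pvStep em i) st) (c0 - 1, c1 - 1)).2] := rfl
  rw [h1, h2, h3, hB]
  simp only [Option.getD_some]
  rw [pv_outer_eq em c0 c1 (c0 - 1, c1 - 1)]
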